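-- pv_equiv track=rewrite | github.com/Badx86/Badx86 | scripts/stepik_activity.py | compute_thresholds
-- ===== SOURCE A (Python) =====
-- def compute_thresholds(pins: list[int]) -> list[int]:
--     """Квартили на ненулевых значениях → 4 границы уровней 1..4."""
--     positives = sorted(v for v in pins if v > 0)
--     if not positives:
--         return [1, 2, 3, 4]
--     n = len(positives)
--     q = [positives[max(0, n * k // 4 - 1)] for k in (1, 2, 3, 4)]
--     # Чиним возможные коллизии.
--     out: list[int] = []
--     prev = 0
--     for v in q:
--         v = max(v, prev + 1)
--         out.append(v)
--         prev = v
--     return out[:4]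
-- ===== SOURCE B (Python) =====
-- def compute_thresholds(pins: list[int]) -> list[int]:
--     """Quartile levels via quickselect of the 4 needed order statistics (no full sort)."""
--     positives = [v for v in pins if v > 0]
--     if not positives:
--         return [1, 2, 3, 4]
--     n = len(positives)
--
--     def select(xs, k):
--         # k-th smallest (0-based) via three-way partition quickselect
--         while True:
--             p = xs[len(xs) // 2]
--             lt = [v for v in xs if v < p]
--             gt = [v for v in xs if v > p]
--             e = len(xs) - len(lt) - len(gt)
--             if k < len(lt):
--                 xs = lt
--             elif k < len(lt) + e:
--                 return p
--             else:
--                 k -= len(lt) + e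
--                 xs = gt
--
--     out = []
--     prev = 0
--     for k in (1, 2, 3, 4):
--         v = select(positives, max(0, n * k // 4 - 1))
--         v = max(v, prev + 1)
--         out.append(v)
--         prev = v
--     return out
-- ===== Notes on version B (the rewrite author's own statement) =====
-- stated objective: alternative
-- what changed: A fully sorts the positive values and indexes the sorted list; B never sorts and instead extracts each of the 4 needed order statistics with a three-way-partition quickselect.
import Mathlib
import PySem

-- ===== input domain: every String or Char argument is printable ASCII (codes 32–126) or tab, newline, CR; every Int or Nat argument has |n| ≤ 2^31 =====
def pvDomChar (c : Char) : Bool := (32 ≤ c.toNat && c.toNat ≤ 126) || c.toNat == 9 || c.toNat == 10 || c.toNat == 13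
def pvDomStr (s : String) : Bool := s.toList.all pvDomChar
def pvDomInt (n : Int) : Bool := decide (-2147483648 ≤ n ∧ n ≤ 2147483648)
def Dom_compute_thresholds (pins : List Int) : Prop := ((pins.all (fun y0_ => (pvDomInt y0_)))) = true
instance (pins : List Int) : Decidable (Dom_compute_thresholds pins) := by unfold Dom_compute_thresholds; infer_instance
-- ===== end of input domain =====

-- B replaces A's full sort with a three-way-partition quickselect of the 4 needed order
-- statistics (objective: alternative algorithm; exact same return value).

-- ===== PORT A =====
def compute_thresholds (pins : List Int) : List Int :=
  let positives := PySem.List.sorted (pins.filter (fun v => decide (0 < v))) (fun x => x) false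
  if positives.isEmpty then [1, 2, 3, 4]
  else
    let n : Int := positives.length
    -- positives[max 0 (n*k//4 - 1)] is always in range (n ≥ 1), so the pyGetD default 0 is never used
    let q := [(1 : Int), 2, 3, 4].map (fun k =>
      PySem.List.pyGetD positives (max 0 (PySem.Int.floordiv (n * k) 4 - 1)) 0)
    let r := q.foldl (fun (st : List Int × Int) v0 =>
      let v := max v0 (st.2 + 1)
      (st.1 ++ [v], v)) ([], 0)
    PySem.List.slice r.1 none (some 4)

-- ===== PORT B =====
-- Source B's `select(xs, k)`: k-th smallest by three-way-partition quickselect, middle-element pivot.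
-- On the empty list Source B's `xs[...]` would raise; B never reaches that, so the [] arm's 0 is junk.
def pvPivot (x : Int) (t : List Int) : Int :=
  PySem.List.pyGetD (x :: t) (PySem.Int.floordiv (((x :: t).length : Nat) : Int) 2) 0

lemma pvPivot_mem (x : Int) (t : List Int) : pvPivot x t ∈ x :: t :=
  PySem.List.pyGetD_mem _ _ (by
    unfold PySem.Raise.InRange
    rw [PySem.Int.floordiv_eq_ediv_of_pos (by norm_num)]
    simp; omega)

lemma pv_shrink_lt (x : Int) (t : List Int) :
    ((x :: t).filter (fun v => decide (v < pvPivot x t))).length < (x :: t).length :=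
  List.length_filter_lt_length_iff_exists.2 ⟨pvPivot x t, pvPivot_mem x t, by simp⟩

lemma pv_shrink_gt (x : Int) (t : List Int) :
    ((x :: t).filter (fun v => decide (pvPivot x t < v))).length < (x :: t).length :=
  List.length_filter_lt_length_iff_exists.2 ⟨pvPivot x t, pvPivot_mem x t, by simp⟩

def pvSelect : List Int → Int → Int
  | [], _ => 0
  | x :: t, k =>
    let p := pvPivot x t
    let lt := (x :: t).filter (fun v => decide (v < p))
    let gt := (x :: t).filter (fun v => decide (p < v))
    let e : Int := ((x :: t).length : Int) - lt.length - gt.length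
    if k < (lt.length : Int) then pvSelect lt k
    else if k < (lt.length : Int) + e then p
    else pvSelect gt (k - ((lt.length : Int) + e))
termination_by xs _ => xs.length
decreasing_by
  · exact pv_shrink_lt x t
  · exact pv_shrink_gt x t

def compute_thresholds_alt (pins : List Int) : List Int :=
  let positives := pins.filter (fun v => decide (0 < v))
  if positives.isEmpty then [1, 2, 3, 4]
  else
    let n : Int := positives.length
    let r := [(1 : Int), 2, 3, 4].foldl (fun (st : List Int × Int) k =>
      let v0 := pvSelect positives (max 0 (PySem.Int.floordiv (n * k) 4 - 1))
      let v := max v0 (st.2 + 1)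
      (st.1 ++ [v], v)) ([], 0)
    r.1

-- ===== PRECONDITION & SPEC =====
def Spec_compute_thresholds (pins : List Int) (out : List Int) : Prop := out = compute_thresholds_alt pins
instance (pins : List Int) (out : List Int) : Decidable (Spec_compute_thresholds pins out) := by unfold Spec_compute_thresholds; infer_instance

-- ===== CLAIM (what is proved, stated in full; the proofs are below) =====
def Claim_equal_compute_thresholds : Prop := ∀ (pins : List Int), Dom_compute_thresholds pins → Spec_compute_thresholds pins (compute_thresholds pins)

-- ===== LEMMAS AND PROOFS =====


lemma pv_count_filter_neg {p : Int → Bool} {l : List Int} {b : Int} (h : p b = false) :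
    (l.filter p).count b = 0 := by
  refine List.count_eq_zero.2 ?_
  intro hb
  have := List.of_mem_filter hb
  simp [h] at this

lemma pv_sorted_decomp (p : Int) (xs : List Int) :
    PySem.List.sorted xs (fun x => x) false =
      PySem.List.sorted (xs.filter (fun v => decide (v < p))) (fun x => x) false
      ++ List.replicate (xs.count p) p
      ++ PySem.List.sorted (xs.filter (fun v => decide (p < v))) (fun x => x) false := by
  apply PySem.List.sorted_id_eq_of_perm_of_pairwise
  · have h1 := PySem.List.sorted_perm (xs.filter (fun v => decide (v < p))) (fun x => x) false
    have h2 := PySem.List.sorted_perm (xs.filter (fun v => decide (p < v))) (fun x => x) false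
    refine ((h1.append (List.Perm.refl _)).append h2).trans ?_
    rw [List.perm_iff_count]
    intro b
    simp only [List.count_append, List.count_replicate]
    rcases lt_trichotomy b p with hb | hb | hb
    · rw [List.count_filter (by simp [hb]), pv_count_filter_neg (p := fun v => decide (p < v)) (by simp; omega)]
      simp [show ¬ (p = b) by omega]
    · subst hb
      rw [pv_count_filter_neg (by simp), pv_count_filter_neg (p := fun v => decide (b < v)) (by simp)]
      simp
    · rw [List.count_filter (p := fun v => decide (p < v)) (by simp [hb]), pv_count_filter_neg (by simp; omega)]
      simp [show ¬ (p = b) by omega]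
  · refine List.pairwise_append.2 ⟨List.pairwise_append.2 ⟨?_, ?_, ?_⟩, ?_, ?_⟩
    · simpa using PySem.List.sorted_pairwise (xs.filter (fun v => decide (v < p))) (fun x => x)
    · exact List.pairwise_replicate.2 (Or.inr le_rfl)
    · intro a ha b hb
      have ha' : a < p := by
        have := ((PySem.List.mem_sorted _ _ _ _).1 ha)
        have := List.of_mem_filter this
        simpa using this
      have hb' : b = p := List.eq_of_mem_replicate hb
      omega
    · simpa using PySem.List.sorted_pairwise (xs.filter (fun v => decide (p < v))) (fun x => x)
    · intro a ha b hb
      have hb' : p < b := by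
        have := ((PySem.List.mem_sorted _ _ _ _).1 hb)
        have := List.of_mem_filter this
        simpa using this
      rcases List.mem_append.1 ha with h | h
      · have : a < p := by
          have := ((PySem.List.mem_sorted _ _ _ _).1 h)
          have := List.of_mem_filter this
          simpa using this
        omega
      · have : a = p := List.eq_of_mem_replicate h
        omega

lemma pv_getD_append_right (l t : List Int) (n : Nat) (d : Int) (h : l.length ≤ n)
    (h2 : n < l.length + t.length) :
    (l ++ t).getD n d = t.getD (n - l.length) d := by
  rw [List.getD_eq_getElem _ _ (by simp; omega), List.getD_eq_getElem _ _ (by omega),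
    List.getElem_append_right h]

lemma pvSelect_eq_aux (N : Nat) : ∀ (xs : List Int), xs.length ≤ N → xs ≠ [] →
    ∀ k : Int, 0 ≤ k → k < (xs.length : Int) →
    pvSelect xs k = (PySem.List.sorted xs (fun x => x) false).getD k.toNat 0 := by
  induction N with
  | zero =>
    intro xs hlen hne
    cases xs with
    | nil => exact absurd rfl hne
    | cons p t => simp at hlen
  | succ N ih =>
    intro xs hlen hne k h0 hk
    match xs, hne with
    | x :: t, _ =>
      rw [pvSelect]
      set p := pvPivot x t with hp
      set lt := (x :: t).filter (fun v => decide (v < p)) with hlt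
      set gt := (x :: t).filter (fun v => decide (p < v)) with hgt
      set cnt := (x :: t).count p with hcnt
      have hdec := pv_sorted_decomp p (x :: t)
      rw [← hlt, ← hgt, ← hcnt] at hdec
      have hsplit : t.length + 1 = lt.length + cnt + gt.length := by
        have := congrArg List.length hdec
        simp [PySem.List.length_sorted] at this
        omega
      have hltlen : lt.length ≤ t.length := by
        have := pv_shrink_lt x t
        rw [← hp, ← hlt] at this
        simpa [Nat.lt_succ_iff] using this
      have hgtlen : gt.length ≤ t.length := by
        have := pv_shrink_gt x t
        rw [← hp, ← hgt] at this
        simpa [Nat.lt_succ_iff] using this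
      have hklen : k < (t.length : Int) + 1 := by simpa using hk
      have hlen' : t.length ≤ N := by simpa using hlen
      have hc : (x :: t).length = t.length + 1 := rfl
      rw [hdec]
      simp only [List.length_cons]
      split_ifs with h1 h2
      · -- k < lt.length : recurse left
        have hlt_ne : lt ≠ [] := by
          intro h
          have hz : lt.length = 0 := by rw [h]; rfl
          omega
        rw [ih lt (by omega) hlt_ne k h0 h1]
        rw [List.getD_append _ _ _ _ (by simp [PySem.List.length_sorted, List.length_append]; omega),
          List.getD_append _ _ _ _ (by simp [PySem.List.length_sorted]; omega)]
      · -- middle : the pivot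
        rw [List.getD_append _ _ _ _
            (by simp [PySem.List.length_sorted, List.length_append, List.length_replicate]; omega)]
        rw [pv_getD_append_right _ _ _ _
            (by simp [PySem.List.length_sorted]; omega)
            (by simp [PySem.List.length_sorted, List.length_replicate]; omega)]
        rw [List.getD_eq_getElem _ _ (by simp [List.length_replicate, PySem.List.length_sorted]; omega)]
        simp
      · -- right : recurse right
        have hgt_ne : gt ≠ [] := by
          intro h
          have hz : gt.length = 0 := by rw [h]; rfl
          omega
        rw [ih gt (by omega) hgt_ne _ (by omega) (by omega)]
        rw [pv_getD_append_right _ _ _ _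
            (by simp [PySem.List.length_sorted, List.length_append, List.length_replicate]; omega)
            (by simp [PySem.List.length_sorted, List.length_append, List.length_replicate]; omega)]
        congr 1
        simp [PySem.List.length_sorted, List.length_append, List.length_replicate]
        omega

lemma pvSelect_eq (xs : List Int) (hne : xs ≠ []) (k : Int) (h0 : 0 ≤ k)
    (hk : k < (xs.length : Int)) :
    pvSelect xs k = (PySem.List.sorted xs (fun x => x) false).getD k.toNat 0 :=
  pvSelect_eq_aux xs.length xs le_rfl hne k h0 hk

-- A's indexed access into the sorted list is B's quickselect
lemma pv_entry (pos : List Int) (hne : pos ≠ []) (i : Int) (h0 : 0 ≤ i)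
    (hi : i < (pos.length : Int)) :
    PySem.List.pyGetD (PySem.List.sorted pos (fun x => x) false) i 0 = pvSelect pos i := by
  rw [pvSelect_eq pos hne i h0 hi]
  rw [PySem.List.pyGetD_eq_getElem _ 0 (by omega) (by simp [PySem.List.length_sorted]; omega)]
  rw [List.getD_eq_getElem _ _ (by simp [PySem.List.length_sorted]; omega)]

-- ===== VERDICT (by name: the statement is the Claim_ definition above) =====
theorem compute_thresholds_spec : Claim_equal_compute_thresholds := by
  intro pins _
  unfold Spec_compute_thresholds compute_thresholds compute_thresholds_alt
  set pos := pins.filter (fun v => decide (0 < v)) with hpos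
  by_cases hne : pos = []
  · simp [hne, List.isEmpty_iff, PySem.List.sorted_eq_nil_iff]
  · have hsne : (PySem.List.sorted pos (fun x => x) false) ≠ [] := by
      rw [Ne, PySem.List.sorted_eq_nil_iff]; exact hne
    have hlen : (PySem.List.sorted pos (fun x => x) false).length = pos.length :=
      PySem.List.length_sorted pos (fun x => x) false
    have hnpos : 0 < pos.length := List.length_pos_iff.2 hne
    have hidx : ∀ k : Int, 1 ≤ k → k ≤ 4 →
        0 ≤ max 0 (PySem.Int.floordiv ((pos.length : Int) * k) 4 - 1) ∧
        max 0 (PySem.Int.floordiv ((pos.length : Int) * k) 4 - 1) < (pos.length : Int) := by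
      intro k hk1 hk4
      rw [PySem.Int.floordiv_eq_ediv_of_pos (by norm_num)]
      have hmul : (pos.length : Int) * k ≤ (pos.length : Int) * 4 :=
        mul_le_mul_of_nonneg_left hk4 (by positivity)
      have hmul0 : 0 ≤ (pos.length : Int) * k := by positivity
      constructor
      · exact le_max_left _ _
      · omega
    simp only [List.isEmpty_iff, hne, hsne, hlen, List.map_cons, List.map_nil,
      List.foldl_cons, List.foldl_nil]
    rw [pv_entry pos hne _ (hidx 1 (by norm_num) (by norm_num)).1 (hidx 1 (by norm_num) (by norm_num)).2,
        pv_entry pos hne _ (hidx 2 (by norm_num) (by norm_num)).1 (hidx 2 (by norm_num) (by norm_num)).2,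
        pv_entry pos hne _ (hidx 3 (by norm_num) (by norm_num)).1 (hidx 3 (by norm_num) (by norm_num)).2,
        pv_entry pos hne _ (hidx 4 (by norm_num) (by norm_num)).1 (hidx 4 (by norm_num) (by norm_num)).2]
    simp [PySem.List.slice]
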